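-- pv_equiv track=rewrite | github.com/NaamaMika/boss-sniffer | step2_manager.py | indexs_out_agents
-- ===== SOURCE A (Python) =====
-- def indexs_out_agents(update_html_code):
--     """Return two indexs that will help to set the outcoming agent information
--     :param update_html_code: html code
--     :return: two indexs
--     """
--     index_keys = 0
--     index_values = 0
--     for i in range(len(update_html_code)):
--         if "labels: %%AGENTS_OUT_KEYS%%" in update_html_code[i]:
--             index_keys = i
--         if "data: %%AGENTS_OUT_VALUES%%" in update_html_code[i]:
--             index_values = i
--     return index_keys, index_values
-- ===== SOURCE B (Python) =====
-- def indexs_out_agents(update_html_code):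
--     """Return two indexs that will help to set the outcoming agent information
--     :param update_html_code: html code
--     :return: two indexs
--     """
--     index_keys = 0
--     index_values = 0
--     found_keys = False
--     found_values = False
--     for i in range(len(update_html_code) - 1, -1, -1):
--         line = update_html_code[i]
--         if not found_keys and "labels: %%AGENTS_OUT_KEYS%%" in line:
--             index_keys = i
--             found_keys = True
--         if not found_values and "data: %%AGENTS_OUT_VALUES%%" in line:
--             index_values = i
--             found_values = True
--         if found_keys and found_values:
--             break
--     return index_keys, index_values
-- ===== Notes on version B (the rewrite author's own statement) =====
-- stated objective: alternative
-- what changed: Scans the lines in reverse with found-flags and breaks as soon as both markers have been seen, instead of A's full forward scan that overwrites the indices on every hit.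
import Mathlib
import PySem

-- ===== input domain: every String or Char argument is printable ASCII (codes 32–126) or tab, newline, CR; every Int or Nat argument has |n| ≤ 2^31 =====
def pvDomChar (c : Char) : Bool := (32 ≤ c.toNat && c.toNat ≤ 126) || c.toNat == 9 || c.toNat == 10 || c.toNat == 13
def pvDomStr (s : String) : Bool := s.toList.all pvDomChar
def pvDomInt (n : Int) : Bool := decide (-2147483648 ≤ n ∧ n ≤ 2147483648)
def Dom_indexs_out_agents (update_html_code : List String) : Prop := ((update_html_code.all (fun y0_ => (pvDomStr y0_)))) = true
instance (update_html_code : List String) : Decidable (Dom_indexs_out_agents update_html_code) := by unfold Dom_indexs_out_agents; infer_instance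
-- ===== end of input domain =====

-- B scans in reverse with found-flags and an early break; return-value equivalence with A's forward scan.

-- ===== PORT A =====
-- forward loop: for i in range(len(xs)), remembering the LAST index containing each marker
def aStep (xs : List String) (st : Int × Int) (i : Nat) : Int × Int :=
  let line := xs.getD i ""
  let st := if PySem.Str.isIn "labels: %%AGENTS_OUT_KEYS%%" line then ((i : Int), st.2) else st
  if PySem.Str.isIn "data: %%AGENTS_OUT_VALUES%%" line then (st.1, (i : Int)) else st

def indexs_out_agents (update_html_code : List String) : Int × Int :=
  (List.range update_html_code.length).foldl (aStep update_html_code) (0, 0)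

-- ===== PORT B =====
-- reverse loop with flags; n is the number of iterations left, current index is n-1
def altGo (xs : List String) : Nat → Bool → Bool → Int → Int → Int × Int
  | 0, _, _, ik, iv => (ik, iv)
  | n + 1, fk, fv, ik, iv =>
    let line := xs.getD n ""
    let hitK := !fk && PySem.Str.isIn "labels: %%AGENTS_OUT_KEYS%%" line
    let ik' := if hitK then (n : Int) else ik
    let fk' := if hitK then true else fk
    let hitV := !fv && PySem.Str.isIn "data: %%AGENTS_OUT_VALUES%%" line
    let iv' := if hitV then (n : Int) else iv
    let fv' := if hitV then true else fv
    if fk' && fv' then (ik', iv') else altGo xs n fk' fv' ik' iv'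

def indexs_out_agents_alt (update_html_code : List String) : Int × Int :=
  altGo update_html_code update_html_code.length false false 0 0

-- ===== PRECONDITION & SPEC =====
def Spec_indexs_out_agents (update_html_code : List String) (out : Int × Int) : Prop := out = indexs_out_agents_alt update_html_code
instance (update_html_code : List String) (out : Int × Int) : Decidable (Spec_indexs_out_agents update_html_code out) := by unfold Spec_indexs_out_agents; infer_instance

-- ===== CLAIM (what is proved, stated in full; the proofs are below) =====
def Claim_equal_indexs_out_agents : Prop := ∀ (update_html_code : List String), Dom_indexs_out_agents update_html_code → Spec_indexs_out_agents update_html_code (indexs_out_agents update_html_code)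

-- ===== LEMMAS AND PROOFS =====

-- once both flags are set, altGo never changes the state
theorem altGo_true_true (xs : List String) (n : Nat) (ik iv : Int) :
    altGo xs n true true ik iv = (ik, iv) := by
  cases n <;> simp [altGo]

-- only indices < m are read, so a snoc beyond them is invisible
theorem altGo_append (xs : List String) (x : String) (m : Nat) (hm : m ≤ xs.length) :
    ∀ fk fv ik iv, altGo (xs ++ [x]) m fk fv ik iv = altGo xs m fk fv ik iv := by
  induction m with
  | zero => intro fk fv ik iv; simp [altGo]
  | succ n ih =>
    intro fk fv ik iv
    have hn : n < xs.length := hm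
    have hg : (xs ++ [x]).getD n "" = xs.getD n "" := by
      simp [List.getD, List.getElem?_append_left hn]
    simp only [altGo, hg, ih (Nat.le_of_lt hn)]

theorem aStep_append (xs : List String) (x : String) (st : Int × Int) (i : Nat)
    (hi : i < xs.length) : aStep (xs ++ [x]) st i = aStep xs st i := by
  simp only [aStep, List.getD, List.getElem?_append_left hi]
  rfl

theorem A_snoc (xs : List String) (x : String) :
    indexs_out_agents (xs ++ [x]) = aStep (xs ++ [x]) (indexs_out_agents xs) xs.length := by
  unfold indexs_out_agents
  rw [List.length_append, List.length_singleton, List.range_succ, List.foldl_append]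
  have h : List.foldl (aStep (xs ++ [x])) (0, 0) (List.range xs.length)
      = List.foldl (aStep xs) (0, 0) (List.range xs.length) :=
    PySem.List.foldl_congr_mem _ _ _ _
      (fun acc i hi => aStep_append xs x acc i (List.mem_range.mp hi))
  rw [h]
  simp [List.foldl]

-- the main invariant: B's reverse scan, from an arbitrary state, in terms of A's result
theorem altGo_eq (xs : List String) : ∀ fk fv ik iv,
    altGo xs xs.length fk fv ik iv =
      ((if fk then ik else if xs.any (fun l => PySem.Str.isIn "labels: %%AGENTS_OUT_KEYS%%" l) then (indexs_out_agents xs).1 else ik),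
       (if fv then iv else if xs.any (fun l => PySem.Str.isIn "data: %%AGENTS_OUT_VALUES%%" l) then (indexs_out_agents xs).2 else iv)) := by
  induction xs using List.reverseRecOn with
  | nil =>
    intro fk fv ik iv
    simp [altGo]
  | append_singleton xs x ih =>
    intro fk fv ik iv
    have hlen : (xs ++ [x]).length = xs.length + 1 := by simp
    have hg : (xs ++ [x]).getD xs.length "" = x := by
      simp [List.getD]
    have hA : indexs_out_agents (xs ++ [x]) = aStep (xs ++ [x]) (indexs_out_agents xs) xs.length :=
      A_snoc xs x
    rw [hlen]
    simp only [altGo, hg]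
    have hred : ∀ fk' fv' ik' iv',
        (if fk' && fv' then (ik', iv') else altGo (xs ++ [x]) xs.length fk' fv' ik' iv')
          = altGo xs xs.length fk' fv' ik' iv' := by
      intro fk' fv' ik' iv'
      rw [altGo_append xs x xs.length (Nat.le_refl _)]
      cases fk' <;> cases fv' <;> simp [altGo_true_true]
    rw [hred, ih]
    rw [hA]
    simp only [aStep, hg, List.any_append, List.any_cons, List.any_nil]
    cases fk <;> cases fv <;>
      cases hK : PySem.Str.isIn "labels: %%AGENTS_OUT_KEYS%%" x <;>
      cases hV : PySem.Str.isIn "data: %%AGENTS_OUT_VALUES%%" x <;>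
      simp


-- if a marker is nowhere in xs, A's corresponding component stays 0
theorem A_fst_zero (xs : List String)
    (h : xs.any (fun l => PySem.Str.isIn "labels: %%AGENTS_OUT_KEYS%%" l) = false) :
    (indexs_out_agents xs).1 = 0 := by
  induction xs using List.reverseRecOn with
  | nil => simp [indexs_out_agents]
  | append_singleton xs x ih =>
    simp only [List.any_append, List.any_cons, List.any_nil, Bool.or_eq_false_iff] at h
    rw [A_snoc]
    have hg : (xs ++ [x]).getD xs.length "" = x := by simp [List.getD]
    simp only [aStep, hg, h.2.1, if_false, Bool.false_eq_true]
    split <;> exact ih h.1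

theorem A_snd_zero (xs : List String)
    (h : xs.any (fun l => PySem.Str.isIn "data: %%AGENTS_OUT_VALUES%%" l) = false) :
    (indexs_out_agents xs).2 = 0 := by
  induction xs using List.reverseRecOn with
  | nil => simp [indexs_out_agents]
  | append_singleton xs x ih =>
    simp only [List.any_append, List.any_cons, List.any_nil, Bool.or_eq_false_iff] at h
    rw [A_snoc]
    have hg : (xs ++ [x]).getD xs.length "" = x := by simp [List.getD]
    simp only [aStep, hg, h.2.1, if_false, Bool.false_eq_true]
    split <;> simp_all [ih h.1]

-- ===== VERDICT (by name: the statement is the Claim_ definition above) =====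
theorem indexs_out_agents_spec : Claim_equal_indexs_out_agents := by
  intro xs _
  unfold Spec_indexs_out_agents indexs_out_agents_alt
  rw [altGo_eq]
  cases hK : xs.any (fun l => PySem.Str.isIn "labels: %%AGENTS_OUT_KEYS%%" l) <;>
    cases hV : xs.any (fun l => PySem.Str.isIn "data: %%AGENTS_OUT_VALUES%%" l) <;>
    simp only [Bool.false_eq_true, if_false, if_true]
  · exact Prod.ext (A_fst_zero xs hK) (A_snd_zero xs hV)
  · exact Prod.ext (A_fst_zero xs hK) rfl
  · exact Prod.ext rfl (A_snd_zero xs hV)
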